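-- pv_equiv track=rewrite | github.com/kroker42/AoC2022 | elftasks.py | cals_per_elf
-- ===== SOURCE A (Python) =====
-- def cals_per_elf(data):
--     cals = [0]
--
--     for d in data:
--         if d is not None:
--             cals[-1] += d
--         else:
--             cals.append(0)
--
--     return cals
-- ===== SOURCE B (Python) =====
-- def cals_per_elf(data):
--     data = list(data)
--     out = []
--     start = 0
--     while True:
--         try:
--             i = data.index(None, start)
--         except ValueError:
--             break
--         out.append(sum(data[start:i]))
--         start = i + 1
--     out.append(sum(data[start:]))
--     return out
-- ===== Notes on version B (the rewrite author's own statement) =====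
-- stated objective: alternative
-- what changed: Replaces A's single pass that mutates a running-totals list in place with a scan that locates each None separator by index(None, start) and appends the sum of the slice between consecutive separators.
import Mathlib
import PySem

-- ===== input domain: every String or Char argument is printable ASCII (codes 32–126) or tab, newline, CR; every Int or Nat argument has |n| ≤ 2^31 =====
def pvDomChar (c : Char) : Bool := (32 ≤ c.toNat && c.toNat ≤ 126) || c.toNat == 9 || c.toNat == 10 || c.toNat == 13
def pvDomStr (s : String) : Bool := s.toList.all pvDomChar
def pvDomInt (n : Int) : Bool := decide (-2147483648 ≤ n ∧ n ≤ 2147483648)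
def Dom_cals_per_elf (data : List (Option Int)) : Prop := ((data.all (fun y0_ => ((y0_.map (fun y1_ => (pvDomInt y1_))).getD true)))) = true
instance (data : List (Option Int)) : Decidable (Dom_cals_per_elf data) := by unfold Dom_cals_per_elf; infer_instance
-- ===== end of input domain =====

-- B replaces A's in-place running-totals accumulation by recursion splitting at the first None; same cost, different decomposition.

-- ===== PORT A =====
-- one pass; cals[-1] += d updates the last cell, None appends a fresh 0
def cals_per_elf (data : List (Option Int)) : List Int :=
  data.foldl (fun cals d =>
    match d with
    | Option.some v => cals.dropLast ++ [cals.getLastD 0 + v]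
    | Option.none => cals ++ [0]) [0]

-- ===== PORT B =====
-- helper for termination, cited by name in decreasing_by
theorem pvIdx_lt {l : List (Option Int)} {j : Nat}
    (h : PySem.List.index? l (Option.none (α := Int)) = Option.some j) :
    j < l.length := by
  obtain ⟨hk, _, _⟩ := PySem.List.getElem_of_index?_eq_some h
  exact hk

-- sum(xs) over a slice holding no None is ported as folding + over getD 0 (exact there)
def pvSum (l : List (Option Int)) : Int := l.foldl (fun s o => s + o.getD 0) 0

-- the while loop of Source B: data.index(None, start) is the first None at position ≥ start,
-- ported as start + (index of None in data[start:]); out.append becomes cons via recursion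
def pvGo (data : List (Option Int)) (start : Nat) : List Int :=
  match h : PySem.List.index? (PySem.List.slice data (Option.some (start : Int)) Option.none)
      (Option.none (α := Int)) with
  | Option.none => [pvSum (PySem.List.slice data (Option.some (start : Int)) Option.none)]
  | Option.some j =>
      pvSum (PySem.List.slice data (Option.some (start : Int)) (Option.some ((start : Int) + (j : Int))))
        :: pvGo data (start + j + 1)
termination_by data.length - start
decreasing_by
  have hj := pvIdx_lt h
  rw [PySem.List.slice_from_natCast, List.length_drop] at hj
  omega

def cals_per_elf_alt (data : List (Option Int)) : List Int := pvGo data 0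

-- ===== PRECONDITION & SPEC =====
def Spec_cals_per_elf (data : List (Option Int)) (out : List Int) : Prop := out = cals_per_elf_alt data
instance (data : List (Option Int)) (out : List Int) : Decidable (Spec_cals_per_elf data out) := by unfold Spec_cals_per_elf; infer_instance

-- ===== CLAIM (what is proved, stated in full; the proofs are below) =====
def Claim_equal_cals_per_elf : Prop := ∀ (data : List (Option Int)), Dom_cals_per_elf data → Spec_cals_per_elf data (cals_per_elf data)

-- ===== LEMMAS AND PROOFS =====

-- canonical recursive characterisation of the grouping
def pvAddHead (v : Int) : List Int → List Int
  | [] => [v]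
  | h :: r => (v + h) :: r

def pvG : List (Option Int) → List Int
  | [] => [0]
  | Option.none :: t => 0 :: pvG t
  | Option.some v :: t => pvAddHead v (pvG t)

theorem pvG_ne_nil (l : List (Option Int)) : pvG l ≠ [] := by
  match l with
  | [] => simp [pvG]
  | Option.none :: t => simp [pvG]
  | Option.some v :: t =>
    cases h : pvG t
    all_goals simp [pvG, pvAddHead, h]

theorem pvAddHead_zero {l : List Int} (h : l ≠ []) : pvAddHead 0 l = l := by
  cases l with
  | nil => exact absurd rfl h
  | cons a t => simp [pvAddHead]

theorem pvAddHead_addHead (x v : Int) (l : List Int) :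
    pvAddHead x (pvAddHead v l) = pvAddHead (x + v) l := by
  cases l with
  | nil => simp [pvAddHead]
  | cons a t => simp [pvAddHead]; ring

theorem pvSum_cons (o : Option Int) (t : List (Option Int)) :
    pvSum (o :: t) = o.getD 0 + pvSum t := by
  simp only [pvSum, List.foldl_cons]
  rw [PySem.List.foldl_add (g := fun o : Option Int => o.getD 0),
      PySem.List.foldl_add (g := fun o : Option Int => o.getD 0)]
  ring

-- A's loop invariant: state is pre ++ [x], x the running sum of the open group
theorem pvA_inv (data : List (Option Int)) :
    ∀ (pre : List Int) (x : Int),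
      data.foldl (fun cals d =>
        match d with
        | Option.some v => cals.dropLast ++ [cals.getLastD 0 + v]
        | Option.none => cals ++ [0]) (pre ++ [x]) = pre ++ pvAddHead x (pvG data) := by
  induction data with
  | nil => intro pre x; simp [pvG, pvAddHead]
  | cons d t ih =>
    intro pre x
    cases d with
    | none =>
      simp only [List.foldl_cons]
      rw [show pre ++ [x] ++ [(0:Int)] = (pre ++ [x]) ++ [(0:Int)] from rfl, ih (pre ++ [x]) 0]
      cases hg : pvG t with
      | nil => exact absurd hg (pvG_ne_nil t)
      | cons a r => simp [pvG, pvAddHead, hg]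
    | some v =>
      simp only [List.foldl_cons, List.dropLast_concat, List.getLastD_concat]
      rw [ih pre (x + v)]
      simp [pvG, pvAddHead_addHead]

theorem pvA_eq_G (data : List (Option Int)) : cals_per_elf data = pvG data := by
  have h := pvA_inv data [] 0
  simpa [cals_per_elf, pvAddHead_zero (pvG_ne_nil data)] using h

theorem pvG_noneFree {l : List (Option Int)} (h : Option.none ∉ l) :
    pvG l = [pvSum l] := by
  induction l with
  | nil => simp [pvG, pvSum]
  | cons o t ih =>
    cases o with
    | none => simp at h
    | some v =>
      have ht : Option.none ∉ t := fun hm => h (List.mem_cons_of_mem _ hm)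
      rw [pvG, ih ht, pvSum_cons]
      simp [pvAddHead]

theorem pvG_append {pre : List (Option Int)} (h : Option.none ∉ pre)
    (rest : List (Option Int)) :
    pvG (pre ++ rest) = pvAddHead (pvSum pre) (pvG rest) := by
  induction pre with
  | nil => simp [pvSum, pvAddHead_zero (pvG_ne_nil rest)]
  | cons o t ih =>
    cases o with
    | none => simp at h
    | some v =>
      have ht : Option.none ∉ t := fun hm => h (List.mem_cons_of_mem _ hm)
      rw [List.cons_append, pvG, ih ht, pvAddHead_addHead, pvSum_cons]
      simp

theorem pvGo_eq_G (data : List (Option Int)) (start : Nat) :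
    pvGo data start = pvG (data.drop start) := by
  refine pvGo.induct data (fun s => pvGo data s = pvG (data.drop s)) ?_ ?_ start
  · intro start h
    rw [pvGo, h, PySem.List.slice_from_natCast]
    rw [PySem.List.slice_from_natCast, PySem.List.index?_eq_none_iff] at h
    rw [pvG_noneFree h]
  · intro start j h ih
    rw [pvGo, h]
    dsimp only
    rw [PySem.List.slice_from_natCast] at h
    obtain ⟨pre, suf, hdec, hlen, hnm⟩ := (PySem.List.index?_eq_some_iff _ _ _).mp h
    have hslice : PySem.List.slice data (Option.some (start : Int))
        (Option.some ((start : Int) + (j : Int))) = pre := by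
      rw [PySem.List.slice_natCast_add, hdec, ← hlen, List.take_left]
    have hdrop : data.drop (start + j + 1) = suf := by
      have : data.drop (start + j + 1) = (data.drop start).drop (j + 1) := by
        rw [List.drop_drop]; ring_nf
      rw [this, hdec, ← hlen]
      simp [List.drop_append]
    rw [hslice, ih, hdrop, hdec, pvG_append hnm, pvG]
    simp [pvAddHead]

-- ===== VERDICT (by name: the statement is the Claim_ definition above) =====
theorem cals_per_elf_spec : Claim_equal_cals_per_elf := by
  intro data _
  unfold Spec_cals_per_elf
  rw [pvA_eq_G, cals_per_elf_alt, pvGo_eq_G]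
  simp
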